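-- pv_equiv track=rewrite | github.com/Adrian-L4M-HF/A-Level-CS | L6/practice_qs.py | letter_in_word
-- ===== SOURCE A (Python) =====
-- def letter_in_word(word):
--     """Take a word and return a letter frequency dictionary"""
--     dict_word = {}
--     for letter in word:
--         if letter not in dict_word:
--             dict_word[letter] = 1
--         else:
--             dict_word[letter] += 1
--     return dict_word
-- ===== SOURCE B (Python) =====
-- def letter_in_word(word):
--     """Take a word and return a letter frequency dictionary"""
--     letters = list(word)
--     return {c: letters.count(c) for c in dict.fromkeys(letters)}
-- ===== Notes on version B (the rewrite author's own statement) =====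
-- stated objective: idiomatic
-- what changed: B replaces A's single accumulating dict-update pass by an ordered-dedup of the letters plus a dict comprehension that counts each distinct letter with list.count.
import Mathlib
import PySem

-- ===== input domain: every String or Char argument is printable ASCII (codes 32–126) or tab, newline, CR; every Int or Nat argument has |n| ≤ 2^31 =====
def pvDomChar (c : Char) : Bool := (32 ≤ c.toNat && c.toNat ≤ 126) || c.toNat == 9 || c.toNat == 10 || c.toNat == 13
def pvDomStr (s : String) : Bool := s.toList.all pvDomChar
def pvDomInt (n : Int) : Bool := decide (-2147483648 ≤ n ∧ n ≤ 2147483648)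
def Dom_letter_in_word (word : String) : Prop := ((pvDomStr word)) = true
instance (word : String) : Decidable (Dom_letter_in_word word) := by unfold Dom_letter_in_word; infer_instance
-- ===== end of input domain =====

-- B replaces A's single accumulating dict-update pass by an ordered dedup plus a
-- per-distinct-letter count; equal output (same value, same key order).

-- ===== PORT A =====
-- iterating a Python string yields length-1 strings, hence the Char.toString map
def letter_in_word (word : String) : List (String × Int) :=
  ((word.toList.map Char.toString).foldl
    (fun d letter =>
      if ¬ d.contains letter then d.insert letter 1
      else d.insert letter (d.getD letter 0 + 1))
    PySem.Dict.empty).items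

-- ===== PORT B =====
def letter_in_word_alt (word : String) : List (String × Int) :=
  let letters := word.toList.map Char.toString
  (PySem.List.dedup letters).map (fun c => (c, (letters.count c : Int)))

-- ===== PRECONDITION & SPEC =====
def Spec_letter_in_word (word : String) (out : List (String × Int)) : Prop := out = letter_in_word_alt word
instance (word : String) (out : List (String × Int)) : Decidable (Spec_letter_in_word word out) := by unfold Spec_letter_in_word; infer_instance

-- ===== CLAIM (what is proved, stated in full; the proofs are below) =====
def Claim_equal_letter_in_word : Prop := ∀ (word : String), Dom_letter_in_word word → Spec_letter_in_word word (letter_in_word word)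

-- ===== LEMMAS AND PROOFS =====

-- a dict not containing a key yields the default
theorem getD_of_not_contains (d : PySem.Dict String Int) (k : String)
    (h : ¬ d.contains k = true) : d.getD k 0 = 0 := by
  simp [PySem.Dict.getD, (PySem.Dict.get?_eq_none_iff_contains d k).mpr (by simpa using h)]

-- A's two branches are the same update, so A's loop is the Counter fold
theorem stepA_eq (d : PySem.Dict String Int) (letter : String) :
    (if ¬ d.contains letter then d.insert letter 1
     else d.insert letter (d.getD letter 0 + 1))
    = d.insert letter (d.getD letter 0 + 1) := by
  by_cases hc : d.contains letter
  · simp [hc]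
  · simp [hc, getD_of_not_contains d letter (by simp [hc])]

-- ===== VERDICT (by name: the statement is the Claim_ definition above) =====
theorem letter_in_word_spec : Claim_equal_letter_in_word := by
  intro word _
  unfold Spec_letter_in_word letter_in_word letter_in_word_alt
  have h : (fun (d : PySem.Dict String Int) letter =>
      if ¬ d.contains letter then d.insert letter 1
      else d.insert letter (d.getD letter 0 + 1))
      = (fun d letter => d.insert letter (d.getD letter 0 + 1)) := by
    funext d letter; exact stepA_eq d letter
  rw [h, PySem.Dict.foldl_insert_getD_add_one_eq_counter, PySem.Dict.items_counter]
  simp [PySem.List.dedup_eq_ofList]
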